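-- pv_equiv track=rewrite | github.com/munaimtahir/MedIQ | backend/app/learning_engine/bridge/spec_v1.py | nearest_bin
-- ===== SOURCE A (Python) =====
-- def nearest_bin(days: int, bins: list[int]) -> int:
--     """
--     Find nearest bin value for given days.
--
--     When there's a tie, prefers the larger bin (rounds up).
--
--     Args:
--         days: Number of days
--         bins: List of bin values (sorted)
--
--     Returns:
--         Nearest bin value
--     """
--     if not bins:
--         return max(1, days)
--
--     # Find closest bin, preferring larger when tied
--     closest = bins[0]
--     min_diff = abs(days - closest)
--
--     # Iterate forward, but on ties prefer the later (larger) bin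
--     for bin_val in bins:
--         diff = abs(days - bin_val)
--         if diff < min_diff or (diff == min_diff and bin_val > closest):
--             min_diff = diff
--             closest = bin_val
--
--     return closest
-- ===== SOURCE B (Python) =====
-- def nearest_bin(days: int, bins: list[int]) -> int:
--     """Sort the bins once, then binary-search for days and compare the two
--     neighbouring bins, preferring the larger one on a tie."""
--     if not bins:
--         return max(1, days)
--     s = sorted(bins)
--     # binary search: lo becomes the first index with s[lo] > days (bisect_right)
--     lo, hi = 0, len(s)
--     while lo < hi:
--         mid = (lo + hi) // 2
--         if s[mid] <= days:
--             lo = mid + 1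
--         else:
--             hi = mid
--     if lo == 0:
--         return s[0]
--     if lo == len(s):
--         return s[-1]
--     before, after = s[lo - 1], s[lo]
--     return after if after - days <= days - before else before
-- ===== Notes on version B (the rewrite author's own statement) =====
-- stated objective: alternative
-- what changed: Replaces A's linear best-so-far scan with sorting the bins once and a hand-written binary search (bisect_right), then comparing the two neighbouring bins, preferring the larger on a tie.
import Mathlib
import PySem

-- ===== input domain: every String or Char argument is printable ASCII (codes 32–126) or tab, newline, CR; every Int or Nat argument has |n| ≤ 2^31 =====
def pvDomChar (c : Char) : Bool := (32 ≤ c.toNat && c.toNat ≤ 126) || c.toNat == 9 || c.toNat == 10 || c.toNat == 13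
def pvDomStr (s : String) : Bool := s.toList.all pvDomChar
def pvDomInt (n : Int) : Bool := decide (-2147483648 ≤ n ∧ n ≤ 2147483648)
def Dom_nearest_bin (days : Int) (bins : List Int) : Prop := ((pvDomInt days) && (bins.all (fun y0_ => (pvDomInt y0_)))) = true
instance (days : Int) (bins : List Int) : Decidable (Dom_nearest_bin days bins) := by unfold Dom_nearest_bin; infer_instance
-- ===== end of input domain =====

-- B sorts the bins once and binary-searches instead of A's linear scan; the binary
-- search is hand-written in Source B (A imports nothing, so `bisect` is not available to B)
-- and is therefore ported step for step below.

-- ===== PORT A =====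
-- A's for-loop over `bins` with state (closest, min_diff), branches in source order.
def nearest_bin (days : Int) (bins : List Int) : Int :=
  match bins with
  | [] => max 1 days
  | b0 :: _ =>
    (bins.foldl (fun (st : Int × Int) binVal =>
        let diff := |days - binVal|
        if diff < st.2 ∨ (diff = st.2 ∧ st.1 < binVal) then (binVal, diff) else st)
      (b0, |days - b0|)).1

-- ===== PORT B =====
-- Source B's while-loop; `s[mid]` is provably in range (0 ≤ lo ≤ mid < hi ≤ len s), ported as getD.
def pvBisect (s : List Int) (days : Int) (lo hi : Nat) : Nat :=
  if lo < hi then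
    let mid := (lo + hi) / 2
    if s.getD mid 0 ≤ days then pvBisect s days (mid + 1) hi
    else pvBisect s days lo mid
  else lo
termination_by hi - lo
decreasing_by all_goals omega

def nearest_bin_alt (days : Int) (bins : List Int) : Int :=
  if bins = [] then max 1 days
  else
    let s := PySem.List.sorted bins (fun x => x) false
    let lo := pvBisect s days 0 s.length
    if lo = 0 then s.getD 0 0
    else if lo = s.length then s.getD (s.length - 1) 0
    else
      let before := s.getD (lo - 1) 0
      let after := s.getD lo 0
      if after - days ≤ days - before then after else before

-- ===== PRECONDITION & SPEC =====
def Spec_nearest_bin (days : Int) (bins : List Int) (out : Int) : Prop := out = nearest_bin_alt days bins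
instance (days : Int) (bins : List Int) (out : Int) : Decidable (Spec_nearest_bin days bins out) := by unfold Spec_nearest_bin; infer_instance

-- ===== CLAIM (what is proved, stated in full; the proofs are below) =====
def Claim_equal_nearest_bin : Prop := ∀ (days : Int) (bins : List Int), Dom_nearest_bin days bins → Spec_nearest_bin days bins (nearest_bin days bins)

-- ===== LEMMAS AND PROOFS =====

-- `m` is at least as good a bin for `d` as `b`: strictly closer, or equally close and not smaller.
def pvGood (d m b : Int) : Prop := |d - m| < |d - b| ∨ (|d - m| = |d - b| ∧ b ≤ m)

-- `m` is the bin A's tie-break selects from `l`.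
def pvBest (d m : Int) (l : List Int) : Prop := ∀ b ∈ l, pvGood d m b

lemma pvGood_refl (d m : Int) : pvGood d m m := by simp [pvGood]

lemma pvGood_trans {d a b c : Int} (h1 : pvGood d a b) (h2 : pvGood d b c) : pvGood d a c := by
  simp only [pvGood, Int.abs_eq_natAbs] at *; omega

lemma pvBest_unique {d m1 m2 : Int} {l : List Int} (h1m : m1 ∈ l) (h2m : m2 ∈ l)
    (h1 : pvBest d m1 l) (h2 : pvBest d m2 l) : m1 = m2 := by
  have a1 := h1 m2 h2m
  have a2 := h2 m1 h1m
  simp only [pvGood, Int.abs_eq_natAbs] at a1 a2; omega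

-- A's fold invariant.
lemma foldA_best (d : Int) (l : List Int) : ∀ (c : Int),
    let r := l.foldl (fun (st : Int × Int) binVal =>
        let diff := |d - binVal|
        if diff < st.2 ∨ (diff = st.2 ∧ st.1 < binVal) then (binVal, diff) else st) (c, |d - c|)
    (r.1 = c ∨ r.1 ∈ l) ∧ pvGood d r.1 c ∧ pvBest d r.1 l := by
  induction l with
  | nil => intro c; exact ⟨Or.inl rfl, pvGood_refl d c, by simp [pvBest]⟩
  | cons b t ih =>
    intro c
    simp only [List.foldl_cons]
    by_cases hc : |d - b| < |d - c| ∨ (|d - b| = |d - c| ∧ c < b)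
    · simp only [if_pos hc]
      obtain ⟨hm, hg, hb⟩ := ih b
      have hgb : pvGood d b c := by
        simp only [pvGood, Int.abs_eq_natAbs] at *; omega
      refine ⟨?_, pvGood_trans hg hgb, ?_⟩
      · rcases hm with h | h
        · exact Or.inr (by simp [h])
        · exact Or.inr (List.mem_cons_of_mem _ h)
      · intro x hx
        rcases List.mem_cons.mp hx with h | h
        · exact h ▸ hg
        · exact hb x h
    · simp only [if_neg hc]
      obtain ⟨hm, hg, hb⟩ := ih c
      have hgb : pvGood d c b := by
        simp only [pvGood, Int.abs_eq_natAbs] at *; omega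
      refine ⟨?_, hg, ?_⟩
      · rcases hm with h | h
        · exact Or.inl h
        · exact Or.inr (List.mem_cons_of_mem _ h)
      · intro x hx
        rcases List.mem_cons.mp hx with h | h
        · exact h ▸ pvGood_trans hg hgb
        · exact hb x h

lemma nearest_bin_best (d : Int) (bins : List Int) (hne : bins ≠ []) :
    nearest_bin d bins ∈ bins ∧ pvBest d (nearest_bin d bins) bins := by
  match bins with
  | [] => exact absurd rfl hne
  | b0 :: t =>
    obtain ⟨hm, _, hb⟩ := foldA_best d (b0 :: t) b0
    have hdef : nearest_bin d (b0 :: t) = ((b0 :: t).foldl (fun (st : Int × Int) binVal =>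
        let diff := |d - binVal|
        if diff < st.2 ∨ (diff = st.2 ∧ st.1 < binVal) then (binVal, diff) else st) (b0, |d - b0|)).1 := rfl
    rw [hdef]
    refine ⟨?_, hb⟩
    rcases hm with h | h
    · rw [h]; exact List.mem_cons_self
    · exact h

-- getD-level monotonicity of a sorted list
lemma pvGetD_mono (s : List Int) (hs : s.Pairwise (fun a b => a ≤ b)) {i j : Nat}
    (hij : i ≤ j) (hj : j < s.length) : s.getD i 0 ≤ s.getD j 0 := by
  rcases Nat.lt_or_ge i j with h | h
  · have := List.pairwise_iff_getElem.mp hs i j (by omega) hj h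
    rwa [List.getD_eq_getElem s 0 (by omega), List.getD_eq_getElem s 0 hj]
  · have : i = j := by omega
    subst this; exact le_refl _

-- the binary-search loop computes the bisect_right index of `d` in the sorted list `s`
lemma pvBisect_spec (s : List Int) (d : Int) (hs : s.Pairwise (fun a b => a ≤ b)) :
    ∀ (n lo hi : Nat), hi - lo ≤ n → lo ≤ hi → hi ≤ s.length →
    (∀ i, i < lo → s.getD i 0 ≤ d) → (∀ i, hi ≤ i → i < s.length → d < s.getD i 0) →
    lo ≤ pvBisect s d lo hi ∧ pvBisect s d lo hi ≤ hi ∧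
    (∀ i, i < pvBisect s d lo hi → s.getD i 0 ≤ d) ∧
    (∀ i, pvBisect s d lo hi ≤ i → i < s.length → d < s.getD i 0) := by
  intro n
  induction n with
  | zero =>
    intro lo hi hfuel hlh _ hlow hhigh
    rw [pvBisect]
    simp only [if_neg (by omega : ¬ lo < hi)]
    exact ⟨le_refl _, hlh, hlow, fun i h1 h2 => hhigh i (by omega) h2⟩
  | succ n ih =>
    intro lo hi hfuel hlh hhi hlow hhigh
    rw [pvBisect]
    by_cases h : lo < hi
    · simp only [if_pos h]
      by_cases hmid : s.getD ((lo + hi) / 2) 0 ≤ d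
      · simp only [if_pos hmid]
        have hrec := ih ((lo + hi) / 2 + 1) hi (by omega) (by omega) hhi
          (fun i hi2 => by
            by_cases hil : i < lo
            · exact hlow i hil
            · exact le_trans (pvGetD_mono s hs (by omega) (by omega)) hmid)
          hhigh
        exact ⟨by omega, hrec.2.1, hrec.2.2.1, hrec.2.2.2⟩
      · simp only [if_neg hmid]
        have hrec := ih lo ((lo + hi) / 2) (by omega) (by omega) (by omega) hlow
          (fun i hi2 hil => lt_of_not_ge (fun hle => hmid
            (le_trans (pvGetD_mono s hs hi2 hil) hle)))
        exact ⟨hrec.1, by omega, hrec.2.2.1, hrec.2.2.2⟩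
    · simp only [if_neg h]
      exact ⟨le_refl _, by omega, hlow, fun i h1 h2 => hhigh i (by omega) h2⟩

-- B's result is a member of the sorted list and best for A's tie-break rule
lemma nearest_bin_alt_best (d : Int) (bins : List Int) (hne : bins ≠ []) :
    nearest_bin_alt d bins ∈ bins ∧ pvBest d (nearest_bin_alt d bins) bins := by
  have hdef : nearest_bin_alt d bins =
      (let s := PySem.List.sorted bins (fun x => x) false
       let lo := pvBisect s d 0 s.length
       if lo = 0 then s.getD 0 0
       else if lo = s.length then s.getD (s.length - 1) 0
       else
         let before := s.getD (lo - 1) 0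
         let after := s.getD lo 0
         if after - d ≤ d - before then after else before) := by
    unfold nearest_bin_alt; rw [if_neg hne]
  set s := PySem.List.sorted bins (fun x => x) false with hsdef
  have hperm : s.Perm bins := PySem.List.sorted_perm bins (fun x => x) false
  have hpw : s.Pairwise (fun a b => a ≤ b) := PySem.List.sorted_pairwise bins (fun x => x)
  have hslen : 0 < s.length := by
    rw [hperm.length_eq]; exact List.length_pos_of_ne_nil hne
  obtain ⟨h0, h1, hbelow, habove⟩ := pvBisect_spec s d hpw s.length 0 s.length
    (by omega) (by omega) (le_refl _) (fun i h => absurd h (Nat.not_lt_zero i))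
    (fun i h1 h2 => absurd h2 (by omega))
  set i := pvBisect s d 0 s.length with hidef
  -- membership of all three candidate values, and the getD→getElem bridge
  have hmemD : ∀ j : Nat, j < s.length → s.getD j 0 ∈ bins := fun j hj => by
    rw [List.getD_eq_getElem s 0 hj]; exact hperm.mem_iff.mp (List.getElem_mem hj)
  -- every member of bins sits at some index of s
  have hidx : ∀ b ∈ bins, ∃ j : Nat, ∃ _ : j < s.length, s.getD j 0 = b := fun b hb => by
    obtain ⟨j, hj, hjb⟩ := List.mem_iff_getElem.mp (hperm.mem_iff.mpr hb)
    exact ⟨j, hj, by rwa [List.getD_eq_getElem s 0 hj]⟩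
  rw [hdef]
  simp only []
  rw [← hidef]
  by_cases hz : i = 0
  · -- every bin is strictly above d; the smallest bin s[0] is nearest
    simp only [if_pos hz]
    refine ⟨hmemD 0 hslen, ?_⟩
    intro b hb
    obtain ⟨j, hj, hjb⟩ := hidx b hb
    have hgt0 : d < s.getD 0 0 := habove 0 (by omega) hslen
    have hgtj : d < s.getD j 0 := habove j (by omega) hj
    have hmono : s.getD 0 0 ≤ s.getD j 0 := pvGetD_mono s hpw (Nat.zero_le j) hj
    rw [← hjb]
    simp only [pvGood, Int.abs_eq_natAbs]
    omega
  · simp only [if_neg hz]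
    by_cases hn : i = s.length
    · -- every bin is ≤ d; the largest bin s[len-1] is nearest
      simp only [if_pos hn]
      refine ⟨hmemD (s.length - 1) (by omega), ?_⟩
      intro b hb
      obtain ⟨j, hj, hjb⟩ := hidx b hb
      have hle : s.getD j 0 ≤ d := hbelow j (by omega)
      have hlel : s.getD (s.length - 1) 0 ≤ d := hbelow (s.length - 1) (by omega)
      have hmono : s.getD j 0 ≤ s.getD (s.length - 1) 0 := pvGetD_mono s hpw (by omega) (by omega)
      rw [← hjb]
      simp only [pvGood, Int.abs_eq_natAbs]
      omega
    · simp only [if_neg hn]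
      have hlow : s.getD (i - 1) 0 ≤ d := hbelow (i - 1) (by omega)
      have hhigh : d < s.getD i 0 := habove i (by omega) (by omega)
      by_cases htie : s.getD i 0 - d ≤ d - s.getD (i - 1) 0
      · simp only [if_pos htie]
        refine ⟨hmemD i (by omega), ?_⟩
        intro b hb
        obtain ⟨j, hj, hjb⟩ := hidx b hb
        rw [← hjb]
        simp only [pvGood, Int.abs_eq_natAbs]
        rcases Nat.lt_or_ge j i with hji | hji
        · have hbd : s.getD j 0 ≤ d := hbelow j hji
          have hmono : s.getD j 0 ≤ s.getD (i - 1) 0 := pvGetD_mono s hpw (by omega) (by omega)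
          omega
        · have hbd : d < s.getD j 0 := habove j hji hj
          have hmono : s.getD i 0 ≤ s.getD j 0 := pvGetD_mono s hpw hji hj
          omega
      · simp only [if_neg htie]
        refine ⟨hmemD (i - 1) (by omega), ?_⟩
        intro b hb
        obtain ⟨j, hj, hjb⟩ := hidx b hb
        rw [← hjb]
        simp only [pvGood, Int.abs_eq_natAbs]
        rcases Nat.lt_or_ge j i with hji | hji
        · have hbd : s.getD j 0 ≤ d := hbelow j hji
          have hmono : s.getD j 0 ≤ s.getD (i - 1) 0 := pvGetD_mono s hpw (by omega) (by omega)
          omega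
        · have hbd : d < s.getD j 0 := habove j hji hj
          have hmono : s.getD i 0 ≤ s.getD j 0 := pvGetD_mono s hpw hji hj
          omega

-- ===== VERDICT (by name: the statement is the Claim_ definition above) =====
theorem nearest_bin_spec : Claim_equal_nearest_bin := by
  intro days bins _
  unfold Spec_nearest_bin
  by_cases hne : bins = []
  · subst hne; rfl
  · obtain ⟨hma, hba⟩ := nearest_bin_best days bins hne
    obtain ⟨hmb, hbb⟩ := nearest_bin_alt_best days bins hne
    exact pvBest_unique hma hmb hba hbb
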